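-- pv_equiv track=rewrite | github.com/fan1018wen/Packages | FactorLib/utils/datetime_func.py | getYearLastDay
-- ===== SOURCE A (Python) =====
-- def getYearLastDay(dates, step=1):
--     dates.sort()
--     YearLastDay = []
--     YearLastDay.append(dates[0])
--     s = 0
--     for iDate in dates:
--         if (iDate[:4]==YearLastDay[-1][:4]):
--             YearLastDay[-1] = iDate
--         else:
--             s += 1
--             if s >= step:
--                 YearLastDay.append(iDate)
--                 s = 0
--             else:
--                 YearLastDay[-1] = iDate
--     return YearLastDay
-- ===== SOURCE B (Python) =====
-- def getYearLastDay(dates, step=1):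
--     dates.sort()
--     years = []
--     for d in dates:
--         if years and years[-1][:4] == d[:4]:
--             years[-1] = d
--         else:
--             years.append(d)
--     st = step if step > 1 else 1
--     out = []
--     while years:
--         chunk, years = years[:st], years[st:]
--         out.append(chunk[-1])
--     return out
-- ===== Notes on version B (the rewrite author's own statement) =====
-- stated objective: simpler
-- what changed: A's single loop with a stateful skip-counter and in-place last-slot rewriting is replaced by a two-phase decomposition: first group the sorted dates into the last date of each consecutive year, then keep the last entry of each chunk of max(step,1) years.
import Mathlib
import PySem

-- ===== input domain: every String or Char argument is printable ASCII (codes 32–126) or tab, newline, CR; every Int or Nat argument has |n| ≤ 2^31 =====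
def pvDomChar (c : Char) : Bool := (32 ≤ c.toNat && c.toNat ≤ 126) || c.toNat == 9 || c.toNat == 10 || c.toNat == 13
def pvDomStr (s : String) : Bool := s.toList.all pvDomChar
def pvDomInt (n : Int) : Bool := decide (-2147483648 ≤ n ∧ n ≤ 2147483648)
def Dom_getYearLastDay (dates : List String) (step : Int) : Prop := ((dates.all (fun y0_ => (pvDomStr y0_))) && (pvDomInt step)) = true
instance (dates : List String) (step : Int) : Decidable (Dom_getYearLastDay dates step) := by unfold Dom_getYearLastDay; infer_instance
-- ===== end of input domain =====

-- B replaces A's stateful skip-counter loop by a two-phase decomposition (group the last date of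
-- each consecutive year, then keep the last entry of each chunk of max(step,1) years); objective:
-- simpler.  Both A and B sort `dates` in place (identical mutation); equivalence is about the
-- return value.

-- ===== PORT A =====
-- iDate[:4]
def pvYr (s : String) : String := PySem.Str.slice s none (some 4)

-- the 'for iDate in dates' loop of A; acc holds YearLastDay REVERSED (head = YearLastDay[-1]), s is A's counter
def pvLoopA (step : Int) : List String → List String → Int → List String
  | [], acc, _ => acc.reverse
  | d :: rest, acc, s =>
    match acc with
    | [] => []   -- unreachable: acc starts nonempty and never shrinks
    | t :: ts =>
      if pvYr d == pvYr t then pvLoopA step rest (d :: ts) s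
      else if s + 1 ≥ step then pvLoopA step rest (d :: t :: ts) 0
      else pvLoopA step rest (d :: ts) (s + 1)

def getYearLastDay (dates : List String) (step : Int) : List String :=
  match PySem.List.sorted dates (fun x => x) false with
  | [] => []   -- dates[0] raises IndexError in Python; excluded by Pre_
  | d0 :: rest => pvLoopA step (d0 :: rest) [d0] 0

-- ===== PORT B =====
-- st = step if step > 1 else 1
def pvSt (step : Int) : Int := if step > 1 then step else 1

-- B's grouping loop; acc holds `years` REVERSED (head = years[-1])
def pvGroupB : List String → List String → List String
  | [], acc => acc.reverse
  | d :: rest, acc =>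
    match acc with
    | [] => pvGroupB rest [d]
    | t :: ts => if pvYr t == pvYr d then pvGroupB rest (d :: ts) else pvGroupB rest (d :: t :: ts)

-- B's 'while years:' chunking loop; chunk[-1] never raises since the chunk is nonempty
def pvChunkSel (step : Int) : List String → List String
  | [] => []
  | y :: ys =>
    (PySem.List.pyGet? (PySem.List.slice (y :: ys) none (some (pvSt step))) (-1)).getD "" ::
      pvChunkSel step (PySem.List.slice (y :: ys) (some (pvSt step)) none)
  termination_by ys => ys.length
  decreasing_by
    rw [PySem.List.slice_some_none]
    simp only [List.length_drop, List.length_cons]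
    have h : 1 ≤ PySem.List.clampIdx (ys.length + 1) (pvSt step) := by
      simp only [PySem.List.clampIdx, pvSt]
      split_ifs <;> omega
    omega

def getYearLastDay_alt (dates : List String) (step : Int) : List String :=
  pvChunkSel step (pvGroupB (PySem.List.sorted dates (fun x => x) false) [])

-- ===== PRECONDITION & SPEC =====
-- Pre_ excludes only the empty list, on which A raises IndexError at dates[0]
def Pre_getYearLastDay (dates : List String) (step : Int) : Prop := dates ≠ []
instance (dates : List String) (step : Int) : Decidable (Pre_getYearLastDay dates step) := by unfold Pre_getYearLastDay; infer_instance
def pvWitness_getYearLastDay : List String × Int := (["20200131", "20201231", "20210630"], 2)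

def Spec_getYearLastDay (dates : List String) (step : Int) (out : List String) : Prop := out = getYearLastDay_alt dates step
instance (dates : List String) (step : Int) (out : List String) : Decidable (Spec_getYearLastDay dates step out) := by unfold Spec_getYearLastDay; infer_instance

-- ===== CLAIM (what is proved, stated in full; the proofs are below) =====
def Claim_equal_getYearLastDay : Prop := ∀ (dates : List String) (step : Int), Dom_getYearLastDay dates step → Pre_getYearLastDay dates step → Spec_getYearLastDay dates step (getYearLastDay dates step)

-- ===== LEMMAS AND PROOFS =====

-- proof-only canonical form: r = years still allowed in the current output slot, t = its current value
def pvCanon (step : Int) (r : Nat) (t : String) : List String → List String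
  | [] => [t]
  | d :: L =>
    if pvYr d = pvYr t then pvCanon step r d L
    else if r ≤ 1 then t :: pvCanon step (pvSt step).toNat d L
    else pvCanon step (r - 1) d L

-- proof-only: last date of each consecutive-year run of t :: L
def pvGrp (t : String) : List String → List String
  | [] => [t]
  | d :: L => if pvYr d = pvYr t then pvGrp d L else t :: pvGrp d L

lemma pvSt_ge_one (step : Int) : 1 ≤ pvSt step := by
  simp only [pvSt]; split_ifs <;> omega

lemma pvSt_ge_self (step : Int) : step ≤ pvSt step := by
  simp only [pvSt]; split_ifs <;> omega

lemma pvGrp_ne_nil (t : String) (L : List String) : pvGrp t L ≠ [] := by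
  induction L generalizing t with
  | nil => simp [pvGrp]
  | cons d L ih => by_cases h : pvYr d = pvYr t <;> simp [pvGrp, h, ih]

lemma pvLoopA_eq (step : Int) (L : List String) : ∀ (t : String) (ts : List String) (r : Nat),
    1 ≤ r → (r : Int) ≤ pvSt step →
    pvLoopA step L (t :: ts) (pvSt step - r) = ts.reverse ++ pvCanon step r t L := by
  induction L with
  | nil => intro t ts r _ _; simp [pvLoopA, pvCanon]
  | cons d L ih =>
    intro t ts r hr1 hr2
    by_cases hy : pvYr d = pvYr t
    · have hyb : (pvYr d == pvYr t) = true := by simp [hy]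
      simp only [pvLoopA, pvCanon, hyb, if_true, if_pos hy]
      exact ih d ts r hr1 hr2
    · have hyb : (pvYr d == pvYr t) = false := by simp [hy]
      simp only [pvLoopA, pvCanon, hyb, Bool.false_eq_true, if_false, if_neg hy]
      by_cases hr : r ≤ 1
      · have hre : r = 1 := by omega
        subst hre
        simp only [le_refl, if_true]
        split_ifs with hc
        · have h0 : (0 : Int) = pvSt step - ((pvSt step).toNat : Int) := by
            have := pvSt_ge_one step; omega
          rw [h0, ih d (t :: ts) (pvSt step).toNat (by have := pvSt_ge_one step; omega)
            (by have := pvSt_ge_one step; omega)]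
          simp
        · exfalso
          have h1 := pvSt_ge_self step
          push_cast at hc
          omega
      · rw [if_neg hr]
        split_ifs with hc
        · exfalso
          by_cases hstep : step > 1 <;> simp only [pvSt, hstep, if_true, if_false] at hc hr2 <;>
            omega
        · have hs : pvSt step - (r : Int) + 1 = pvSt step - ((r - 1 : Nat) : Int) := by
            push_cast [Nat.cast_sub (by omega : 1 ≤ r)]; ring
          rw [hs]
          exact ih d ts (r - 1) (by omega)
            (by rw [Nat.cast_sub (by omega : 1 ≤ r)]; push_cast; omega)

lemma pvGroupB_eq (L : List String) : ∀ (t : String) (ts : List String),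
    pvGroupB L (t :: ts) = ts.reverse ++ pvGrp t L := by
  induction L with
  | nil => intro t ts; simp [pvGroupB, pvGrp]
  | cons d L ih =>
    intro t ts
    by_cases hy : pvYr d = pvYr t
    · have hyb : (pvYr t == pvYr d) = true := by simp [hy]
      simp only [pvGroupB, pvGrp, hyb, if_true, if_pos hy]
      exact ih d ts
    · have hyb : (pvYr t == pvYr d) = false := by simp [Ne.symm hy]
      simp only [pvGroupB, pvGrp, hyb, Bool.false_eq_true, if_false, if_neg hy]
      rw [ih d (t :: ts)]; simp

lemma pvDropMin {α : Type} (xs : List α) (k : Nat) : xs.drop (min k xs.length) = xs.drop k := by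
  by_cases h : k ≤ xs.length
  · rw [Nat.min_eq_left h]
  · rw [Nat.min_eq_right (by omega), List.drop_length, List.drop_eq_nil_of_le (by omega)]

lemma pvGetLastD_irrel {xs : List String} (h : xs ≠ []) (a b : String) :
    xs.getLastD a = xs.getLastD b := by
  rw [List.getLastD_eq_getLast?, List.getLastD_eq_getLast?]
  obtain ⟨v, hv⟩ := Option.isSome_iff_exists.mp (List.getLast?_isSome.mpr h)
  simp [hv]

lemma pvChunkSel_cons {step : Int} {ys : List String} (h : ys ≠ []) :
    pvChunkSel step ys =
      (ys.take (pvSt step).toNat).getLastD "" :: pvChunkSel step (ys.drop (pvSt step).toNat) := by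
  cases ys with
  | nil => exact absurd rfl h
  | cons y t =>
    rw [pvChunkSel]
    have hb : (0 : Int) ≤ pvSt step := by have := pvSt_ge_one step; omega
    rw [PySem.List.slice_to _ hb]
    rw [PySem.List.slice_some_none]
    have hcl : PySem.List.clampIdx (y :: t).length (pvSt step) =
        min (pvSt step).toNat (y :: t).length := by
      simp only [PySem.List.clampIdx]
      rw [if_neg (by have := pvSt_ge_one step; omega)]
    rw [hcl, pvDropMin]
    rw [PySem.List.pyGet?_neg_one, ← List.getLastD_eq_getLast?]

lemma pvChunkSel_grp (step : Int) (L : List String) : ∀ (t : String) (r : Nat),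
    1 ≤ r → (r : Int) ≤ pvSt step →
    ((pvGrp t L).take r).getLastD "" :: pvChunkSel step ((pvGrp t L).drop r) = pvCanon step r t L := by
  induction L with
  | nil =>
    intro t r hr1 _
    cases r with
    | zero => omega
    | succ n => simp [pvGrp, pvCanon, pvChunkSel]
  | cons d L ih =>
    intro t r hr1 hr2
    by_cases hy : pvYr d = pvYr t
    · simp only [pvGrp, pvCanon, if_pos hy]
      exact ih d r hr1 hr2
    · simp only [pvGrp, pvCanon, if_neg hy]
      by_cases hr : r ≤ 1
      · have hre : r = 1 := by omega
        subst hre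
        simp only [le_refl, if_true, List.take_succ_cons, List.take_zero, List.drop_succ_cons,
          List.drop_zero, List.getLastD_cons, List.getLastD_nil]
        congr 1
        rw [pvChunkSel_cons (pvGrp_ne_nil d L)]
        exact ih d (pvSt step).toNat (by have := pvSt_ge_one step; omega)
          (by have := pvSt_ge_one step; omega)
      · rw [if_neg hr]
        obtain ⟨m, rfl⟩ : ∃ m, r = m + 1 := ⟨r - 1, by omega⟩
        simp only [List.take_succ_cons, List.drop_succ_cons, List.getLastD_cons,
          Nat.add_sub_cancel]
        rw [pvGetLastD_irrel (by simp [List.take_eq_nil_iff, pvGrp_ne_nil d L]; omega) t ""]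
        exact ih d m (by omega) (by push_cast at hr2 ⊢; omega)

-- ===== VERDICT (by name: the statement is the Claim_ definition above) =====
theorem getYearLastDay_spec : Claim_equal_getYearLastDay := by
  intro dates step _ hpre
  unfold Spec_getYearLastDay getYearLastDay getYearLastDay_alt
  have hne : PySem.List.sorted dates (fun x => x) false ≠ [] := fun hc =>
    hpre ((PySem.List.sorted_eq_nil_iff _ _ _).mp hc)
  cases hs : PySem.List.sorted dates (fun x => x) false with
  | nil => exact absurd hs hne
  | cons d0 rest =>
    have hA : pvLoopA step (d0 :: rest) [d0] 0 = pvCanon step (pvSt step).toNat d0 rest := by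
      have h0 : (0 : Int) = pvSt step - ((pvSt step).toNat : Int) := by
        have := pvSt_ge_one step; omega
      rw [show pvLoopA step (d0 :: rest) [d0] 0 = pvLoopA step rest [d0] 0 by
            simp [pvLoopA]]
      rw [h0, pvLoopA_eq step rest d0 [] (pvSt step).toNat
        (by have := pvSt_ge_one step; omega) (by have := pvSt_ge_one step; omega)]
      simp
    have hB : pvChunkSel step (pvGroupB (d0 :: rest) []) = pvCanon step (pvSt step).toNat d0 rest := by
      rw [show pvGroupB (d0 :: rest) [] = pvGroupB rest [d0] by simp [pvGroupB]]
      rw [pvGroupB_eq rest d0 []]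
      rw [List.reverse_nil, List.nil_append]
      rw [pvChunkSel_cons (pvGrp_ne_nil d0 rest)]
      exact pvChunkSel_grp step rest d0 (pvSt step).toNat
        (by have := pvSt_ge_one step; omega) (by have := pvSt_ge_one step; omega)
    show pvLoopA step (d0 :: rest) [d0] 0 = pvChunkSel step (pvGroupB (d0 :: rest) [])
    rw [hA, hB]
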